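-- pv_equiv track=rewrite | github.com/kashann/web-mining | 5.Cart/cart.py | divide_set
-- ===== SOURCE A (Python) =====
-- def divide_set(rows, column, value):
--     split_function = None
--     if isinstance(value, int) or isinstance(value, float):
--         split_function = lambda row: row[column] >= value
--     else:
--         split_function = lambda row: row[column] == value
--     true_set = [row for row in rows if split_function(row)]
--     false_set = [row for row in rows if not split_function(row)]
--     return (false_set, true_set)
-- ===== SOURCE B (Python) =====
-- def divide_set(rows, column, value):
--     # Sort-based partition: a stable sort on a 0/1 key moves all "false" rows
--     # (key 0) in front of all "true" rows (key 1) while preserving their order,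
--     # so the answer is one split of the sorted list.
--     if isinstance(value, int) or isinstance(value, float):
--         key = lambda row: 1 if row[column] >= value else 0
--     else:
--         key = lambda row: 1 if row[column] == value else 0
--     s = sorted(rows, key=key)
--     k = sum(map(key, rows))          # number of "true" rows
--     n = len(s) - k
--     return (s[:n], s[n:])
-- ===== Notes on version B (the rewrite author's own statement) =====
-- stated objective: alternative
-- what changed: Replaces A's two filtering comprehensions by a stable sort on a 0/1 predicate key followed by a single split of the sorted list at the count of true rows; correctness rests on stability of the sort, not on filtering.
import Mathlib
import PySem

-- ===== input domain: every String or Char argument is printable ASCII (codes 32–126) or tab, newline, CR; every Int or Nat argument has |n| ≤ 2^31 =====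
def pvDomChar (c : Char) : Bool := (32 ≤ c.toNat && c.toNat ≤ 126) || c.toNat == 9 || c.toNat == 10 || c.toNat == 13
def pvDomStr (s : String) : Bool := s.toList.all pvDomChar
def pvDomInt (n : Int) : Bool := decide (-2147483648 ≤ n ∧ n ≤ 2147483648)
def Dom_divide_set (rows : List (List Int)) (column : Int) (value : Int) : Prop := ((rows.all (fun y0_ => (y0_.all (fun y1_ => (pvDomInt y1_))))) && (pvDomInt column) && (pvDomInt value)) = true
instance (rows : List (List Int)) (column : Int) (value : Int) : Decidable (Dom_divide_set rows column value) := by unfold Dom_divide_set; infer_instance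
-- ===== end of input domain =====

-- B partitions by a STABLE SORT on a 0/1 predicate key and one split of the sorted
-- list, instead of A's two filtering comprehensions (objective: alternative algorithm).
-- value : Int here, so Python's isinstance(value, int) branch (>=) is always taken.

-- ===== PORT A =====
-- row[column] is PySem.List.pyGetD under Pre_ (index in range for every row).
def divide_set (rows : List (List Int)) (column : Int) (value : Int) : List (List Int) × List (List Int) :=
  let split_function := fun (row : List Int) => decide (PySem.List.pyGetD row column 0 ≥ value)
  let true_set := rows.filter (fun row => split_function row)
  let false_set := rows.filter (fun row => !split_function row)
  (false_set, true_set)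

-- ===== PORT B =====
-- Source B: stable sort on key (1 if row[column] >= value else 0), k = sum(map(key, rows)),
-- answer = (s[:len(s)-k], s[len(s)-k:]).
def divide_set_alt (rows : List (List Int)) (column : Int) (value : Int) : List (List Int) × List (List Int) :=
  let key := fun (row : List Int) => if PySem.List.pyGetD row column 0 ≥ value then (1 : Int) else 0
  let s := PySem.List.sorted rows key
  let k := (rows.map key).sum
  let n : Int := (s.length : Int) - k
  (PySem.List.slice s none (some n), PySem.List.slice s (some n) none)

-- ===== PRECONDITION & SPEC =====
-- Pre_: Python's row[column] raises IndexError when column is out of range for some row.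
def Pre_divide_set (rows : List (List Int)) (column : Int) (value : Int) : Prop :=
  ∀ row ∈ rows, PySem.Raise.InRange row.length column
instance (rows : List (List Int)) (column : Int) (value : Int) : Decidable (Pre_divide_set rows column value) := by unfold Pre_divide_set; infer_instance
def pvWitness_divide_set : List (List Int) × Int × Int := ([[1, 2], [3, 0]], 1, 1)

def Spec_divide_set (rows : List (List Int)) (column : Int) (value : Int) (out : List (List Int) × List (List Int)) : Prop := out = divide_set_alt rows column value
instance (rows : List (List Int)) (column : Int) (value : Int) (out : List (List Int) × List (List Int)) : Decidable (Spec_divide_set rows column value out) := by unfold Spec_divide_set; infer_instance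

-- ===== CLAIM (what is proved, stated in full; the proofs are below) =====
def Claim_equal_divide_set : Prop := ∀ (rows : List (List Int)) (column : Int) (value : Int), Dom_divide_set rows column value → Pre_divide_set rows column value → Spec_divide_set rows column value (divide_set rows column value)

-- ===== LEMMAS AND PROOFS =====

-- Inserting a key-1 element into (zeros ++ ones) appends it at the end.
theorem insertBy_one {α : Type} (key : α → Int) (x : α) (l : List α)
    (hx : key x = 1) (hl : ∀ z ∈ l, key z = 0 ∨ key z = 1) :
    PySem.List.insertBy (fun a b => decide (key a < key b)) x l = l ++ [x] := by
  apply PySem.List.insertBy_of_forall_not_before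
  intro y hy
  rcases hl y hy with h | h <;> simp [h, hx]

-- Inserting a key-0 element into (zeros ++ ones) puts it between the blocks.
theorem insertBy_zero {α : Type} (key : α → Int) (x : α) (F T : List α)
    (hx : key x = 0) (hF : ∀ z ∈ F, key z = 0) (hT : ∀ z ∈ T, key z = 1) :
    PySem.List.insertBy (fun a b => decide (key a < key b)) x (F ++ T) = F ++ x :: T := by
  induction F with
  | nil =>
    cases T with
    | nil => simp [PySem.List.insertBy]
    | cons t ts =>
      have ht : key t = 1 := hT t (by simp)
      simp [PySem.List.insertBy, hx, ht]
  | cons f fs ih =>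
    have hf : key f = 0 := hF f (by simp)
    have := ih (fun z hz => hF z (by simp [hz]))
    simp [PySem.List.insertBy, hx, hf, this]

-- Invariant of the insertion-sort fold for a 0/1-valued key.
theorem foldl_insertBy_partition {α : Type} (key : α → Int)
    (rows F T : List α)
    (hk : ∀ z ∈ rows, key z = 0 ∨ key z = 1)
    (hF : ∀ z ∈ F, key z = 0) (hT : ∀ z ∈ T, key z = 1) :
    rows.foldl (fun acc x => PySem.List.insertBy (fun a b => decide (key a < key b)) x acc) (F ++ T)
      = (F ++ rows.filter (fun r => key r = 0)) ++ (T ++ rows.filter (fun r => key r = 1)) := by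
  induction rows generalizing F T with
  | nil => simp
  | cons r rs ih =>
    rcases hk r (by simp) with h | h
    · have hins := insertBy_zero key r F T h hF hT
      have step := ih (F ++ [r]) T (fun z hz => hk z (by simp [hz]))
        (by intro z hz; rcases List.mem_append.1 hz with hz | hz
            · exact hF z hz
            · simp at hz; simpa [hz] using h) hT
      simp only [List.foldl_cons, hins]
      have : F ++ r :: T = (F ++ [r]) ++ T := by simp
      rw [this, step]
      simp [List.filter_cons, h]
    · have hins : PySem.List.insertBy (fun a b => decide (key a < key b)) r (F ++ T)
          = F ++ (T ++ [r]) := by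
        rw [← List.append_assoc]
        apply insertBy_one key r (F ++ T) h
        intro z hz
        rcases List.mem_append.1 hz with hz | hz
        · exact Or.inl (hF z hz)
        · exact Or.inr (hT z hz)
      have step := ih F (T ++ [r]) (fun z hz => hk z (by simp [hz])) hF
        (by intro z hz; rcases List.mem_append.1 hz with hz | hz
            · exact hT z hz
            · simp at hz; simpa [hz] using h)
      simp only [List.foldl_cons, hins, step, List.append_assoc]
      simp [List.filter_cons, h]

-- Stable sort on the 0/1 key = "false" block then "true" block.
theorem sorted_key01 {α : Type} (key : α → Int) (rows : List α)
    (hk : ∀ z ∈ rows, key z = 0 ∨ key z = 1) :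
    PySem.List.sorted rows key
      = rows.filter (fun r => key r = 0) ++ rows.filter (fun r => key r = 1) := by
  rw [PySem.List.sorted_eq_foldl_insertBy]
  simpa using foldl_insertBy_partition key rows [] [] hk (by simp) (by simp)

theorem sum_map_key01 {α : Type} (key : α → Int) (rows : List α)
    (hk : ∀ z ∈ rows, key z = 0 ∨ key z = 1) :
    (rows.map key).sum = ((rows.filter (fun r => key r = 1)).length : Int) := by
  induction rows with
  | nil => simp
  | cons r rs ih =>
    have := ih (fun z hz => hk z (by simp [hz]))
    rcases hk r (by simp) with h | h <;>
      simp [List.filter_cons, h, this] <;> push_cast <;> ring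

-- ===== VERDICT (by name: the statement is the Claim_ definition above) =====
theorem divide_set_spec : Claim_equal_divide_set := by
  intro rows column value _ _
  unfold Spec_divide_set divide_set divide_set_alt
  set key := fun (row : List Int) => if PySem.List.pyGetD row column 0 ≥ value then (1 : Int) else 0 with hkey
  have hk : ∀ z ∈ rows, key z = 0 ∨ key z = 1 := by
    intro z _; by_cases h : PySem.List.pyGetD z column 0 ≥ value <;> simp [hkey, h]
  have hsort := sorted_key01 key rows hk
  have hsum := sum_map_key01 key rows hk
  have hkey0 : ∀ r : List Int, (key r = 0) = ¬ (PySem.List.pyGetD r column 0 ≥ value) := by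
    intro r; by_cases h : PySem.List.pyGetD r column 0 ≥ value <;> simp [hkey, h]
  have hkey1 : ∀ r : List Int, (key r = 1) = (PySem.List.pyGetD r column 0 ≥ value) := by
    intro r; by_cases h : PySem.List.pyGetD r column 0 ≥ value <;> simp [hkey, h]
  set F := rows.filter (fun r => key r = 0) with hF
  set T := rows.filter (fun r => key r = 1) with hT
  have hlen : ((PySem.List.sorted rows key).length : Int) - (rows.map key).sum = (F.length : Int) := by
    rw [hsort, hsum]; push_cast [List.length_append]; ring
  have hn : (0 : Int) ≤ ((PySem.List.sorted rows key).length : Int) - (rows.map key).sum := by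
    rw [hlen]; positivity
  simp only [hlen]
  rw [PySem.List.slice_to _ (by positivity), PySem.List.slice_from _ (by positivity)]
  have htoNat : ((F.length : Int)).toNat = F.length := by simp
  rw [htoNat, hsort, List.take_left, List.drop_left]
  refine Prod.ext ?_ ?_
  · show rows.filter _ = F
    rw [hF]; apply List.filter_congr; intro r _
    by_cases h : PySem.List.pyGetD r column 0 ≥ value <;> simp [hkey, h, not_le.2, lt_of_not_ge]
  · show rows.filter _ = T
    rw [hT]; apply List.filter_congr; intro r _
    by_cases h : PySem.List.pyGetD r column 0 ≥ value <;> simp [hkey, h]
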